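-- pv_equiv track=rewrite | github.com/Jung2312/BaekjoonHub | 프로그래머스/2/42626. 더 맵게/더 맵게.py | solution
-- ===== SOURCE A (Python) =====
-- import heapq as hq
--
-- def solution(scoville, K):
--     answer = 0
--     hq.heapify(scoville)
--
--     while scoville[0] < K:
--         if len(scoville) < 2:
--             answer = -1
--             return answer
--
--         num1 = hq.heappop(scoville)
--         num2 = hq.heappop(scoville)
--
--         hq.heappush(scoville, num1 + (num2 * 2))
--         answer += 1
--
--     return answer
-- ===== SOURCE B (Python) =====
-- def solution(scoville, K):
--     # Sort once; consume the sorted list from the front with an index and keep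
--     # the live suffix sorted by binary-search insertion (no heap).
--     # Return value only; does not mutate scoville.
--     s = sorted(scoville)
--     i = 0
--     count = 0
--     while s[i] < K:
--         if len(s) - i < 2:
--             return -1
--         v = s[i] + 2 * s[i + 1]
--         i += 2
--         lo, hi = i, len(s)
--         while lo < hi:
--             mid = (lo + hi) // 2
--             if s[mid] <= v:
--                 lo = mid + 1
--             else:
--                 hi = mid
--         s.insert(lo, v)
--         count += 1
--     return count
-- ===== Notes on version B (the rewrite author's own statement) =====
-- stated objective: alternative
-- what changed: Replaces the heap (heapify/heappop/heappush) with one initial sort, a front index that consumes the two smallest elements, and a binary-search insertion of each mixed value into the sorted live suffix, without mutating the argument.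
import Mathlib
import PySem

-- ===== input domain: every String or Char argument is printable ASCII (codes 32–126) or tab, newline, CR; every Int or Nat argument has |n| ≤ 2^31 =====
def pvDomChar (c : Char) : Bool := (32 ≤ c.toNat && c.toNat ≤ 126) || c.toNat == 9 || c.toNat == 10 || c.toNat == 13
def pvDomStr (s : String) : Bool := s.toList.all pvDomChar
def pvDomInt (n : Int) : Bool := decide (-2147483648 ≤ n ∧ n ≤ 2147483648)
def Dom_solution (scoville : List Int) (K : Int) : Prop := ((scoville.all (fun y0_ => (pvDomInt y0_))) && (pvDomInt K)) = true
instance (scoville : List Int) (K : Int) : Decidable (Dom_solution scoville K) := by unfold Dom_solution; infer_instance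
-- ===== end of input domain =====

-- B replaces A's heap with one initial sort, a front index, and binary-search insertion
-- into the sorted suffix; equivalence is about the RETURN value only (A heapifies its
-- argument in place, B does not mutate it).

-- ===== PORT A =====
-- heapq is a library: its operations are modeled by their value contract
-- (heappop returns the minimum of the heap's contents and removes one occurrence;
-- heappush adds the element; heapify leaves the contents unchanged). This is exact
-- for the returned answer, which depends only on the heap's multiset of contents.
def popMin : List Int → Int × List Int
  | [] => (0, [])                 -- heappop on an empty heap raises; never reached under Pre_
  | [x] => (x, [])
  | x :: y :: t =>
    let r := popMin (y :: t)
    if x ≤ r.1 then (x, y :: t) else (r.1, x :: r.2)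

def aLoop (K : Int) : Nat → List Int → Int → Int
  | 0, _, acc => acc
  | fuel + 1, h, acc =>
    match h with
    | [] => acc                   -- scoville[0] raises IndexError here; excluded by Pre_
    | _ :: _ =>
      if (popMin h).1 < K then    -- scoville[0]: the heap root is the minimum of the contents
        if h.length < 2 then -1
        else
          let p1 := popMin h             -- num1 = hq.heappop(scoville)
          let p2 := popMin p1.2          -- num2 = hq.heappop(scoville)
          aLoop K fuel (p2.2 ++ [p1.1 + p2.1 * 2]) (acc + 1)   -- hq.heappush(...)
      else acc

def solution (scoville : List Int) (K : Int) : Int :=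
  aLoop K scoville.length scoville 0   -- fuel: each iteration shrinks the heap by one

-- ===== PORT B =====
-- the inner 'lo, hi = i, len(s) / while lo < hi: …' binary search of Source B
def bsLoop (s : List Int) (v : Int) : Nat → Nat → Nat → Nat
  | 0, lo, _ => lo
  | fuel + 1, lo, hi =>
    if lo < hi then
      if s.getD ((lo + hi) / 2) 0 ≤ v then   -- s[mid]: mid < hi ≤ len(s), always in range
        bsLoop s v fuel ((lo + hi) / 2 + 1) hi
      else
        bsLoop s v fuel lo ((lo + hi) / 2)
    else lo

def bLoop (K : Int) : Nat → List Int → Nat → Int → Int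
  | 0, _, _, cnt => cnt
  | fuel + 1, s, i, cnt =>
    if i < s.length then
      if s.getD i 0 < K then      -- s[i]
        if s.length - i < 2 then -1
        else
          -- v = s[i] + 2 * s[i+1]; i += 2; binary search over [i, len(s)); s.insert(lo, v)
          bLoop K fuel
            (PySem.List.insert s
              ((bsLoop s (s.getD i 0 + 2 * s.getD (i + 1) 0) (s.length - (i + 2)) (i + 2) s.length : Nat) : Int)
              (s.getD i 0 + 2 * s.getD (i + 1) 0))
            (i + 2) (cnt + 1)
      else cnt
    else cnt                      -- s[i] raises IndexError here (only initial []); excluded by Pre_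

def solution_alt (scoville : List Int) (K : Int) : Int :=
  bLoop K scoville.length (PySem.List.sorted scoville (fun x => x) false) 0 0

-- ===== PRECONDITION & SPEC =====
-- scoville = [] makes both Pythons raise IndexError at s[0]; A returns on every other input.
def Pre_solution (scoville : List Int) (K : Int) : Prop := scoville ≠ []
instance (scoville : List Int) (K : Int) : Decidable (Pre_solution scoville K) := by
  unfold Pre_solution; infer_instance

def pvWitness_solution : List Int × Int := ([1, 2, 3, 9, 10, 12], 7)

def Spec_solution (scoville : List Int) (K : Int) (out : Int) : Prop := out = solution_alt scoville K
instance (scoville : List Int) (K : Int) (out : Int) : Decidable (Spec_solution scoville K out) := by unfold Spec_solution; infer_instance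

-- ===== CLAIM (what is proved, stated in full; the proofs are below) =====
def Claim_equal_solution : Prop := ∀ (scoville : List Int) (K : Int), Dom_solution scoville K → Pre_solution scoville K → Spec_solution scoville K (solution scoville K)

-- ===== LEMMAS AND PROOFS =====

theorem popMin_perm : ∀ (h : List Int), h ≠ [] → h.Perm ((popMin h).1 :: (popMin h).2)
  | [], hne => absurd rfl hne
  | [x], _ => by simp [popMin]
  | x :: y :: t, _ => by
    have ih := popMin_perm (y :: t) (by simp)
    simp only [popMin]
    split
    · exact List.Perm.refl _
    · exact (ih.cons x).trans (List.Perm.swap _ _ _)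

theorem popMin_fst_le : ∀ (h : List Int), ∀ z ∈ h, (popMin h).1 ≤ z
  | [x], z, hz => by simp at hz; simp [popMin, hz]
  | x :: y :: t, z, hz => by
    have ih := popMin_fst_le (y :: t)
    simp only [popMin]
    split
    · rename_i hle
      rcases List.mem_cons.mp hz with rfl | hz'
      · simp
      · exact le_trans hle (ih z hz')
    · rename_i hgt
      rcases List.mem_cons.mp hz with rfl | hz'
      · exact le_of_lt (lt_of_not_ge hgt)
      · exact ih z hz'

theorem popMin_fst_eq_head (h : List Int) (a : Int) (rest : List Int)
    (hp : h.Perm (a :: rest)) (hs : (a :: rest).Pairwise (· ≤ ·)) :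
    (popMin h).1 = a := by
  have hne : h ≠ [] := by
    intro hnil; rw [hnil] at hp; exact absurd hp.symm (by simp)
  have hm : (popMin h).1 ∈ h := (popMin_perm h hne).symm.subset (List.mem_cons_self ..)
  have hm' : (popMin h).1 ∈ a :: rest := hp.subset hm
  have h1 : (popMin h).1 ≤ a := popMin_fst_le h a (hp.symm.subset (List.mem_cons_self ..))
  have h2 : a ≤ (popMin h).1 := by
    rcases List.mem_cons.mp hm' with he | hm''
    · exact le_of_eq he.symm
    · exact (List.pairwise_cons.mp hs).1 _ hm''
  exact le_antisymm h1 h2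

theorem popMin_snd_perm (h : List Int) (a : Int) (rest : List Int)
    (hp : h.Perm (a :: rest)) (hs : (a :: rest).Pairwise (· ≤ ·)) :
    (popMin h).2.Perm rest := by
  have hne : h ≠ [] := by
    intro hnil; rw [hnil] at hp; exact absurd hp.symm (by simp)
  have := (popMin_perm h hne).symm.trans hp
  rw [popMin_fst_eq_head h a rest hp hs] at this
  exact this.cons_inv

theorem getD_drop_eq (s : List Int) (m j : Nat) (h : m + j < s.length) :
    s.getD (m + j) 0 = (s.drop m).getD j 0 := by
  have h2 : j < (s.drop m).length := by rw [List.length_drop]; omega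
  rw [List.getD_eq_getElem _ _ h, List.getD_eq_getElem _ _ h2, List.getElem_drop]

theorem getD_suffix (s t : List Int) (m j : Nat) (ht : s.drop m = t)
    (h : m + j < s.length) (hj : j < t.length) : s.getD (m + j) 0 = t[j] := by
  rw [getD_drop_eq s m j h, ht, List.getD_eq_getElem _ _ hj]

theorem bsLoop_spec (s : List Int) (v : Int) (base : Nat)
    (hmono : ∀ p q : Nat, base ≤ p → p ≤ q → q < s.length → s.getD p 0 ≤ s.getD q 0) :
    ∀ (fuel lo hi : Nat), base ≤ lo → lo ≤ hi → hi ≤ s.length → hi - lo ≤ fuel →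
    lo ≤ bsLoop s v fuel lo hi ∧ bsLoop s v fuel lo hi ≤ hi ∧
    (∀ j, lo ≤ j → j < bsLoop s v fuel lo hi → s.getD j 0 ≤ v) ∧
    (∀ j, bsLoop s v fuel lo hi ≤ j → j < hi → v < s.getD j 0)
  | 0, lo, hi, _, hlh, _, hf => by
    have he : lo = hi := by omega
    subst he
    exact ⟨le_refl _, le_refl _, by intro j h1 h2; simp [bsLoop] at h2; omega,
      by intro j h1 h2; simp [bsLoop] at h1; omega⟩
  | fuel + 1, lo, hi, hb, hlh, hhl, hf => by
    simp only [bsLoop]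
    by_cases hc : lo < hi
    · rw [if_pos hc]
      have hm1 : lo ≤ (lo + hi) / 2 := by omega
      have hm2 : (lo + hi) / 2 < hi := by omega
      by_cases hcmp : s.getD ((lo + hi) / 2) 0 ≤ v
      · rw [if_pos hcmp]
        obtain ⟨h1, h2, h3, h4⟩ := bsLoop_spec s v base hmono fuel ((lo + hi) / 2 + 1) hi
          (by omega) (by omega) hhl (by omega)
        refine ⟨by omega, h2, ?_, h4⟩
        intro j hj1 hj2
        by_cases hjm : (lo + hi) / 2 + 1 ≤ j
        · exact h3 j hjm hj2
        · exact le_trans (hmono j ((lo + hi) / 2) (by omega) (by omega) (by omega)) hcmp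
      · rw [if_neg hcmp]
        obtain ⟨h1, h2, h3, h4⟩ := bsLoop_spec s v base hmono fuel lo ((lo + hi) / 2)
          hb (by omega) (by omega) (by omega)
        refine ⟨h1, by omega, h3, ?_⟩
        intro j hj1 hj2
        by_cases hjm : j < (lo + hi) / 2
        · exact h4 j hj1 hjm
        · exact lt_of_lt_of_le (lt_of_not_ge hcmp)
            (hmono ((lo + hi) / 2) j (by omega) (by omega) (by omega))
    · rw [if_neg hc]
      exact ⟨le_refl _, by omega, by intro j h1 h2; omega, by intro j h1 h2; omega⟩

theorem loop_eq (K : Int) : ∀ (fuel : Nat) (h s : List Int) (i : Nat) (acc : Int),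
    i ≤ s.length → h.Perm (s.drop i) → (s.drop i).Pairwise (· ≤ ·) →
    aLoop K fuel h acc = bLoop K fuel s i acc
  | 0, _, _, _, _, _, _, _ => rfl
  | fuel + 1, h, s, i, acc, hil, hp, hs => by
    by_cases hlt : i < s.length
    · -- suffix nonempty
      have hdl : (s.drop i).length = s.length - i := List.length_drop
      obtain ⟨a, rest, hu⟩ : ∃ a rest, s.drop i = a :: rest := by
        cases hd : s.drop i with
        | nil =>
          exfalso
          have := congrArg List.length hd
          rw [hdl] at this
          simp at this
          omega
        | cons a rest => exact ⟨a, rest, rfl⟩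
      have ha : s.getD i 0 = a := by
        have := getD_suffix s (a :: rest) i 0 hu (by omega) (by simp)
        simpa using this
      rw [hu] at hp hs
      have hne : h ≠ [] := fun hnil => by rw [hnil] at hp; exact absurd hp.symm (by simp)
      obtain ⟨x, h', rfl⟩ : ∃ x h', h = x :: h' := by
        cases h with
        | nil => exact absurd rfl hne
        | cons x h' => exact ⟨x, h', rfl⟩
      have hmin : (popMin (x :: h')).1 = a := popMin_fst_eq_head _ a rest hp hs
      have hplen : (x :: h').length = rest.length + 1 := by simpa using hp.length_eq
      have hulen : s.length - i = rest.length + 1 := by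
        have := congrArg List.length hu; rw [hdl] at this; simpa using this
      simp only [aLoop, bLoop]
      rw [if_pos hlt, ha, hmin]
      by_cases hK : a < K
      · rw [if_pos hK, if_pos hK]
        match rest, hp, hs, hplen, hulen, hu with
        | [], hp, hs, hplen, hulen, hu =>
          have hplen' : h'.length = 0 := by simpa using hplen
          have hulen' : s.length - i = 1 := by simpa using hulen
          have c1 : (x :: h').length < 2 := by simp only [List.length_cons]; omega
          have c2 : s.length - i < 2 := by omega
          rw [if_pos c1, if_pos c2]
        | b :: t0, hp, hs, hplen, hulen, hu =>
          have c1 : ¬ (x :: h').length < 2 := by simp only [List.length_cons] at hplen ⊢; omega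
          have c2 : ¬ s.length - i < 2 := by simp only [List.length_cons] at hulen; omega
          rw [if_neg c1, if_neg c2]
          have hslen : s.length = i + 2 + t0.length := by simp only [List.length_cons] at hulen; omega
          have hb : s.getD (i + 1) 0 = b := by
            have := getD_suffix s (a :: b :: t0) i 1 hu (by omega) (by simp)
            simpa using this
          rw [hb]
          -- A's two pops
          have hrest : (popMin (x :: h')).2.Perm (b :: t0) := popMin_snd_perm _ a _ hp hs
          have hs' : (b :: t0).Pairwise (· ≤ ·) := (List.pairwise_cons.mp hs).2
          have hmin2 : (popMin (popMin (x :: h')).2).1 = b :=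
            popMin_fst_eq_head _ b t0 hrest hs'
          have hrest2 : (popMin (popMin (x :: h')).2).2.Perm t0 :=
            popMin_snd_perm _ b t0 hrest hs'
          rw [hmin2]
          -- the sorted live suffix after consuming two elements
          have ht0 : s.drop (i + 2) = t0 := by
            have h2 : List.drop 2 (List.drop i s) = List.drop (i + 2) s := List.drop_drop
            rw [hu] at h2
            simpa using h2.symm
          have ht0p : t0.Pairwise (· ≤ ·) := (List.pairwise_cons.mp hs').2
          have hmono : ∀ p q : Nat, i + 2 ≤ p → p ≤ q → q < s.length →
              s.getD p 0 ≤ s.getD q 0 := by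
            intro p q hp1 hpq hq
            rcases Nat.eq_or_lt_of_le hpq with rfl | hlt2
            · exact le_refl _
            · have e1 : s.getD p 0 = t0[p - (i + 2)]'(by omega) := by
                have := getD_suffix s t0 (i + 2) (p - (i + 2)) ht0 (by omega) (by omega)
                rwa [show i + 2 + (p - (i + 2)) = p from by omega] at this
              have e2 : s.getD q 0 = t0[q - (i + 2)]'(by omega) := by
                have := getD_suffix s t0 (i + 2) (q - (i + 2)) ht0 (by omega) (by omega)
                rwa [show i + 2 + (q - (i + 2)) = q from by omega] at this
              rw [e1, e2]
              exact List.pairwise_iff_getElem.mp ht0p _ _ _ _ (by omega)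
          obtain ⟨hl1, hl2, hl3, hl4⟩ := bsLoop_spec s (a + 2 * b) (i + 2) hmono
            (s.length - (i + 2)) (i + 2) s.length (le_refl _) (by omega) (le_refl _) (by omega)
          set lo := bsLoop s (a + 2 * b) (s.length - (i + 2)) (i + 2) s.length with hlo
          set k := lo - (i + 2) with hk
          have hins : PySem.List.insert s ((lo : Nat) : Int) (a + 2 * b)
              = List.take lo s ++ (a + 2 * b) :: List.drop lo s :=
            PySem.List.insert_natCast s lo _ hl2
          have htklen : (List.take lo s).length = lo := by
            rw [List.length_take]; omega
          have hsuffix : (PySem.List.insert s ((lo : Nat) : Int) (a + 2 * b)).drop (i + 2)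
              = List.take k t0 ++ (a + 2 * b) :: List.drop k t0 := by
            rw [hins, List.drop_append_of_le_length (by omega)]
            congr 1
            · rw [List.drop_take, ← ht0]
            · congr 1
              rw [show lo = (i + 2) + k from by omega, ← List.drop_drop, ht0]
          -- every kept prefix element is ≤ the mixed value, every kept suffix element is >
          have htk : ∀ y ∈ List.take k t0, y ≤ a + 2 * b := by
            intro y hy
            obtain ⟨j, hj, hje⟩ := List.mem_iff_getElem.mp hy
            have hjk : j < k := by rw [List.length_take] at hj; omega
            have hjt : j < t0.length := by rw [List.length_take] at hj; omega
            rw [List.getElem_take] at hje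
            have := hl3 (i + 2 + j) (by omega) (by omega)
            rwa [getD_suffix s t0 (i + 2) j ht0 (by omega) hjt, hje] at this
          have htd : ∀ y ∈ List.drop k t0, a + 2 * b < y := by
            intro y hy
            obtain ⟨j, hj, hje⟩ := List.mem_iff_getElem.mp hy
            have hjt : k + j < t0.length := by rw [List.length_drop] at hj; omega
            rw [List.getElem_drop] at hje
            have := hl4 (i + 2 + (k + j)) (by omega) (by omega)
            rwa [getD_suffix s t0 (i + 2) (k + j) ht0 (by omega) hjt, hje] at this
          apply loop_eq K fuel
          · rw [hins, List.length_append, htklen]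
            simp
            omega
          · rw [hsuffix]
            have e : a + b * 2 = a + 2 * b := by ring
            rw [e]
            refine List.perm_append_comm.trans ?_
            refine ((hrest2.cons _).trans ?_).trans List.perm_middle.symm
            rw [List.take_append_drop]
          · rw [hsuffix]
            refine List.pairwise_append.mpr ⟨List.Pairwise.sublist (List.take_sublist k t0) ht0p, ?_, ?_⟩
            · refine List.pairwise_cons.mpr ⟨fun y hy => le_of_lt (htd y hy),
                List.Pairwise.sublist (List.drop_sublist k t0) ht0p⟩
            · intro x hx y hy
              rcases List.mem_cons.mp hy with rfl | hy'
              · exact htk x hx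
              · exact le_trans (htk x hx) (le_of_lt (htd y hy'))
      · rw [if_neg hK, if_neg hK]
    · -- empty suffix: A's heap is empty too; both return the accumulator
      have hdrop : s.drop i = [] := List.drop_eq_nil_of_le (by omega)
      rw [hdrop] at hp
      have hh : h = [] := hp.eq_nil
      subst hh
      simp only [aLoop, bLoop]
      rw [if_neg hlt]

-- ===== VERDICT (by name: the statement is the Claim_ definition above) =====
theorem solution_spec : Claim_equal_solution := by
  intro scoville K _ _
  unfold Spec_solution solution solution_alt
  exact loop_eq K scoville.length scoville _ 0 0 (by simp)
    (by simpa using (PySem.List.sorted_perm scoville (fun x => x) false).symm)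
    (by simpa using PySem.List.sorted_pairwise scoville (fun x => x))
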